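-- pv_equiv track=rewrite | github.com/mushxoxo/quantara | ml_module/risk_analysis/political_risk.py | _keyword_based_sentiment
-- ===== SOURCE A (Python) =====
-- from typing import Dict, List, Optional, Tuple
--
-- def _keyword_based_sentiment(headlines: List[str]) -> int:
--     """
--     Simple keyword-based sentiment analysis (fallback).
--
--     Args:
--         headlines: List of headline strings
--
--     Returns:
--         Number of negative headlines
--     """
--     negative_keywords = [
--         "accident", "crash", "protest", "strike", "curfew", "violence",
--         "killed", "injured", "fire", "explosion", "blocked", "closed",
--         "danger", "risk", "emergency", "disaster", "chaos", "unrest"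
--     ]
--
--     negative_count = 0
--     for headline in headlines:
--         headline_lower = headline.lower()
--         if any(keyword in headline_lower for keyword in negative_keywords):
--             negative_count += 1
--
--     return negative_count
-- ===== SOURCE B (Python) =====
-- from typing import Dict, List, Optional, Tuple
--
-- _NEGATIVE_KEYWORDS = [
--     "accident", "crash", "protest", "strike", "curfew", "violence",
--     "killed", "injured", "fire", "explosion", "blocked", "closed",
--     "danger", "risk", "emergency", "disaster", "chaos", "unrest"
-- ]
--
-- # Index the keywords once by their first letter: at each text position only the
-- # keywords that can start there are tried, instead of scanning the whole text
-- # once per keyword.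
-- _KW_BY_FIRST = {}
-- for _kw in _NEGATIVE_KEYWORDS:
--     _KW_BY_FIRST.setdefault(_kw[0], []).append(_kw)
--
--
-- def _keyword_based_sentiment(headlines: List[str]) -> int:
--     negative_count = 0
--     for headline in headlines:
--         text = headline.lower()
--         if any(text.startswith(kw, i)
--                for i in range(len(text))
--                for kw in _KW_BY_FIRST.get(text[i], ())):
--             negative_count += 1
--     return negative_count
-- ===== Notes on version B (the rewrite author's own statement) =====
-- stated objective: alternative
-- what changed: Replaces the per-keyword whole-text substring scan with a first-letter dict index built once: each headline is scanned position by position and only the keywords indexed under the current character are tried with startswith.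
import Mathlib
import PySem

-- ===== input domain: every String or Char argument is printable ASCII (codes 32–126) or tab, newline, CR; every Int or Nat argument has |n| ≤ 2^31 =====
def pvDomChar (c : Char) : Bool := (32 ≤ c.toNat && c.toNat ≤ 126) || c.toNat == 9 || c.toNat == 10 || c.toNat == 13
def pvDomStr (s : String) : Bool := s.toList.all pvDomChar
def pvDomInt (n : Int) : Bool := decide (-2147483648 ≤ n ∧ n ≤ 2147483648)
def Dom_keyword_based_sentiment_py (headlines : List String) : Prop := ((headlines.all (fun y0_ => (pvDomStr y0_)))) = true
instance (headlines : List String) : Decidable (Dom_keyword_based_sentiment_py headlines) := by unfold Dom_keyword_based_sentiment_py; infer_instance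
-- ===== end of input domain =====

-- B replaces A's per-keyword whole-text substring scan by a first-letter dict index
-- consulted at each text position (objective: alternative; not measured faster).

-- ===== PORT A =====
def negKeywordsA : List String :=
  ["accident", "crash", "protest", "strike", "curfew", "violence",
   "killed", "injured", "fire", "explosion", "blocked", "closed",
   "danger", "risk", "emergency", "disaster", "chaos", "unrest"]

def keyword_based_sentiment_py (headlines : List String) : Int :=
  headlines.foldl (fun negative_count headline =>
    let headline_lower := PySem.Str.lower headline
    if negKeywordsA.any (fun keyword => PySem.Str.isIn keyword headline_lower)
    then negative_count + 1 else negative_count) 0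

-- ===== PORT B =====
def negKeywordsB : List String :=
  ["accident", "crash", "protest", "strike", "curfew", "violence",
   "killed", "injured", "fire", "explosion", "blocked", "closed",
   "danger", "risk", "emergency", "disaster", "chaos", "unrest"]

-- module-level index build: _KW_BY_FIRST.setdefault(kw[0], []).append(kw)
-- (kw[0] via pyGet?; every keyword is nonempty so the none branch is unreachable)
def kwByFirst : PySem.Dict Char (List String) :=
  negKeywordsB.foldl (fun d kw =>
    match PySem.Str.pyGet? kw 0 with
    | some c => PySem.Dict.insert d c (PySem.Dict.getD d c [] ++ [kw])
    | none => d) PySem.Dict.empty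

-- 'text.startswith(kw, i)' with 0 ≤ i is ported exactly as isPrefixOf on the i-suffix;
-- 'text[i]' with 0 ≤ i < len(text) is ported exactly as getD i (default unreachable).
def keyword_based_sentiment_py_alt (headlines : List String) : Int :=
  headlines.foldl (fun negative_count headline =>
    let text := (PySem.Str.lower headline).toList
    if (List.range text.length).any (fun i =>
         (PySem.Dict.getD kwByFirst (text.getD i ' ') []).any (fun kw =>
            List.isPrefixOf kw.toList (text.drop i)))
    then negative_count + 1 else negative_count) 0

-- ===== PRECONDITION & SPEC =====
def Spec_keyword_based_sentiment_py (headlines : List String) (out : Int) : Prop := out = keyword_based_sentiment_py_alt headlines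
instance (headlines : List String) (out : Int) : Decidable (Spec_keyword_based_sentiment_py headlines out) := by unfold Spec_keyword_based_sentiment_py; infer_instance

-- ===== CLAIM (what is proved, stated in full; the proofs are below) =====
def Claim_equal_keyword_based_sentiment_py : Prop := ∀ (headlines : List String), Dom_keyword_based_sentiment_py headlines → Spec_keyword_based_sentiment_py headlines (keyword_based_sentiment_py headlines)

-- ===== LEMMAS AND PROOFS =====

-- the index evaluated to its literal value
theorem kwByFirst_eq : kwByFirst = PySem.Dict.mk
    [('a', ["accident"]), ('c', ["crash", "curfew", "closed", "chaos"]),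
     ('p', ["protest"]), ('s', ["strike"]), ('v', ["violence"]),
     ('k', ["killed"]), ('i', ["injured"]), ('f', ["fire"]),
     ('e', ["explosion", "emergency"]), ('b', ["blocked"]),
     ('d', ["danger", "disaster"]), ('r', ["risk"]), ('u', ["unrest"])] := by
  decide

-- soundness of the index: anything filed under c is a keyword starting with c
theorem kwByFirst_sound (c : Char) (kw : String)
    (h : kw ∈ PySem.Dict.getD kwByFirst c []) :
    kw ∈ negKeywordsA ∧ kw.toList.head? = some c := by
  rw [kwByFirst_eq] at h
  simp only [PySem.Dict.getD, PySem.Dict.get?, List.find?] at h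
  repeat' split at h
  all_goals simp_all
  all_goals rcases h with rfl|rfl|rfl|rfl
  all_goals subst_vars
  all_goals exact ⟨by decide, by decide⟩

-- completeness of the index (boolean, so 'decide' checks it):
-- every keyword is nonempty and is filed under its first character
theorem kwByFirst_complete :
    negKeywordsA.all (fun kw =>
      !kw.toList.isEmpty &&
      decide (kw ∈ PySem.Dict.getD kwByFirst kw.toList.head! [])) = true := by
  decide

-- per-headline: B's position scan finds a hit iff A's per-keyword scan does
theorem hit_eq (hl : String) :
    ((List.range hl.toList.length).any (fun i =>
       (PySem.Dict.getD kwByFirst (hl.toList.getD i ' ') []).any (fun kw =>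
          List.isPrefixOf kw.toList (hl.toList.drop i))))
    = negKeywordsA.any (fun keyword => PySem.Str.isIn keyword hl) := by
  rw [Bool.eq_iff_iff]
  simp only [List.any_eq_true, List.mem_range]
  constructor
  · rintro ⟨i, hi, kw, hkw, hpre⟩
    obtain ⟨hmem, -⟩ := kwByFirst_sound _ _ hkw
    refine ⟨kw, hmem, ?_⟩
    rw [PySem.Str.isIn_iff_infix]
    exact ((List.isPrefixOf_iff_prefix.mp hpre).isInfix).trans (List.drop_suffix i hl.toList).isInfix
  · rintro ⟨kw, hkw, hin⟩
    rw [PySem.Str.isIn_iff_infix] at hin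
    obtain ⟨s₁, s₂, heq⟩ := hin
    have hall := List.all_eq_true.mp kwByFirst_complete kw hkw
    simp only [Bool.and_eq_true, Bool.not_eq_true', List.isEmpty_eq_false_iff, decide_eq_true_eq] at hall
    obtain ⟨hne, hidx⟩ := hall
    have hcons : kw.toList.head! :: kw.toList.tail = kw.toList := List.cons_head!_tail hne
    refine ⟨s₁.length, ?_, kw, ?_, ?_⟩
    · have hlen := congrArg List.length heq
      simp only [List.length_append] at hlen
      have : 0 < kw.toList.length := List.length_pos_iff.mpr hne
      omega
    · have hget : hl.toList.getD s₁.length ' ' = kw.toList.head! := by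
        rw [List.getD_eq_getElem?_getD, ← heq, List.append_assoc,
            List.getElem?_append_right (Nat.le_refl _), ← hcons]
        simp
      rw [hget]; exact hidx
    · have hdrop : hl.toList.drop s₁.length = kw.toList ++ s₂ := by
        rw [← heq, List.append_assoc, List.drop_left]
      rw [hdrop, List.isPrefixOf_iff_prefix]
      exact List.prefix_append _ _

-- ===== VERDICT (by name: the statement is the Claim_ definition above) =====
theorem keyword_based_sentiment_py_spec : Claim_equal_keyword_based_sentiment_py := by
  intro headlines _
  unfold Spec_keyword_based_sentiment_py keyword_based_sentiment_py keyword_based_sentiment_py_alt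
  apply PySem.List.foldl_congr_mem
  intro acc headline _
  simp only [hit_eq (PySem.Str.lower headline)]
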